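-- pv_equiv track=rewrite | github.com/KandorSolus/AOC2023 | 4/4.py | check_value
-- ===== SOURCE A (Python) =====
-- def check_value(lst):
--     first = list(filter(len, lst[0]))
--     other = list(filter(len, lst[1]))
--     score = 0
--     for i in range(len(first)):
--         if first[i] in other:
--             if score == 0:
--                 score = 1
--             else:
--                 score *= 2
--     return score
-- ===== SOURCE B (Python) =====
-- def check_value(lst):
--     first = sorted(filter(len, lst[0]))
--     other = sorted(set(filter(len, lst[1])))
--     count = 0
--     i = j = 0
--     while i < len(first) and j < len(other):
--         if first[i] < other[j]:
--             i += 1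
--         elif other[j] < first[i]:
--             j += 1
--         else:
--             count += 1
--             i += 1
--     return 2 ** (count - 1) if count else 0
-- ===== Notes on version B (the rewrite author's own statement) =====
-- stated objective: alternative
-- what changed: Replaces the per-element linear membership scan with doubling accumulator by sorting first and the deduplicated other, counting matches with a two-pointer merge, then returning 2**(count-1) (0 when count is 0).
import Mathlib
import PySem

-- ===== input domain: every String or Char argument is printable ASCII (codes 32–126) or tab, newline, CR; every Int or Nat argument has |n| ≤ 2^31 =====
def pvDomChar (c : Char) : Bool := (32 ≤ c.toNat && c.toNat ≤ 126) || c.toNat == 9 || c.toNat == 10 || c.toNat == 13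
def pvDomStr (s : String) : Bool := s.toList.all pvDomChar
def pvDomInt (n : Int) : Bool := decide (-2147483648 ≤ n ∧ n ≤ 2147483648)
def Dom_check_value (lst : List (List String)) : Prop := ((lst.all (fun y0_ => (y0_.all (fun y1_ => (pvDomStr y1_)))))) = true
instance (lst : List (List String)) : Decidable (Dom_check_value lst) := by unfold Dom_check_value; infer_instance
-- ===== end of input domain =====

-- B replaces A's per-element membership scan with a doubling accumulator by sorting both sides
-- and counting matches with a two-pointer merge, finishing with 2^(count-1) (0 when count = 0);
-- objective: alternative (sort-and-merge) algorithm.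

-- ===== PORT A =====
def check_value (lst : List (List String)) : Int :=
  match PySem.List.pyGet? lst 0, PySem.List.pyGet? lst 1 with
  | some l0, some l1 =>
    let first := l0.filter (fun s => !(PySem.Str.len s == 0))
    let other := l1.filter (fun s => !(PySem.Str.len s == 0))
    (PySem.List.pyRange 0 (first.length : Int) 1).foldl
      (fun score i =>
        if PySem.List.pyGetD first i "" ∈ other then
          if score = 0 then 1 else score * 2
        else score) 0
  | _, _ => 0  -- unreachable under Pre_ (Python raises IndexError)

-- ===== PORT B =====
-- the two-pointer while loop of Source B: indices (i, j) into immutable lists become the suffixes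
-- first.drop i / other.drop j; branches in the same order as Source B
def pvMergeCount : List String → List String → Nat
  | [], _ => 0
  | _ :: _, [] => 0
  | x :: xs, y :: ys =>
    if x < y then pvMergeCount xs (y :: ys)
    else if y < x then pvMergeCount (x :: xs) ys
    else pvMergeCount xs (y :: ys) + 1
termination_by a b => a.length + b.length

def check_value_alt (lst : List (List String)) : Int :=
  match PySem.List.pyGet? lst 0 with
  | none => 0  -- unreachable under Pre_ (Python raises IndexError)
  | some l0 =>
    match PySem.List.pyGet? lst 1 with
    | none => 0  -- unreachable under Pre_ (Python raises IndexError)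
    | some l1 =>
      let first := PySem.List.sorted (l0.filter (fun s => !(PySem.Str.len s == 0))) (fun x => x) false
      let other := PySem.List.sorted (PySem.Set.ofList (l1.filter (fun s => !(PySem.Str.len s == 0)))) (fun x => x) false
      let count := pvMergeCount first other
      if count = 0 then 0 else (2 : Int) ^ (count - 1)

-- ===== PRECONDITION & SPEC =====
-- Python A indexes lst[0] and lst[1]: it raises IndexError unless lst has at least two elements.
def Pre_check_value (lst : List (List String)) : Prop := 2 ≤ lst.length
instance (lst : List (List String)) : Decidable (Pre_check_value lst) := by unfold Pre_check_value; infer_instance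
def pvWitness_check_value : List (List String) := [["a", "", "b"], ["b", "a"]]

def Spec_check_value (lst : List (List String)) (out : Int) : Prop := out = check_value_alt lst
instance (lst : List (List String)) (out : Int) : Decidable (Spec_check_value lst out) := by unfold Spec_check_value; infer_instance

-- ===== CLAIM (what is proved, stated in full; the proofs are below) =====
def Claim_equal_check_value : Prop := ∀ (lst : List (List String)), Dom_check_value lst → Pre_check_value lst → Spec_check_value lst (check_value lst)

-- ===== LEMMAS AND PROOFS =====

-- A's loop invariant: after k matches the accumulator holds (if k = 0 then 0 else 2^(k-1))
theorem check_value_loop (other : List String) (l : List String) : ∀ (k : Nat),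
    l.foldl (fun score x => if x ∈ other then (if score = 0 then 1 else score * 2) else score)
      (if k = 0 then 0 else (2 : Int) ^ (k - 1))
    = (if k + l.countP (fun x => decide (x ∈ other)) = 0 then 0
       else (2 : Int) ^ (k + l.countP (fun x => decide (x ∈ other)) - 1)) := by
  induction l with
  | nil => intro k; simp
  | cons x l ih =>
    intro k
    by_cases hx : x ∈ other
    · have hstep : (if (if k = 0 then (0 : Int) else (2 : Int) ^ (k - 1)) = 0 then 1
          else (if k = 0 then (0 : Int) else (2 : Int) ^ (k - 1)) * 2)
          = (if k + 1 = 0 then (0 : Int) else (2 : Int) ^ (k + 1 - 1)) := by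
        rcases Nat.eq_zero_or_pos k with hk | hk
        · simp [hk]
        · have hk0 : ¬ k = 0 := by omega
          rw [if_neg hk0, if_neg (pow_ne_zero _ (by norm_num : (2:Int) ≠ 0)),
            if_neg (by omega : ¬ k + 1 = 0)]
          have he : k + 1 - 1 = (k - 1) + 1 := by omega
          rw [he, pow_succ]
      simp only [List.foldl_cons, List.countP_cons, hx, decide_true, if_true, hstep]
      rw [ih (k + 1)]
      have hc : k + 1 + List.countP (fun x => decide (x ∈ other)) l
          = k + (List.countP (fun x => decide (x ∈ other)) l + 1) := by omega
      rw [hc]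
    · simp only [List.foldl_cons, List.countP_cons, hx, decide_false, if_false]
      exact ih k

-- the two-pointer merge on a key-sorted left list and a strictly sorted right list counts
-- exactly the left-list elements (with multiplicity) that occur in the right list
theorem pvMergeCount_spec : ∀ (a b : List String), a.Pairwise (· ≤ ·) → b.Pairwise (· < ·) →
    pvMergeCount a b = a.countP (fun x => decide (x ∈ b)) := by
  intro a b ha hb
  fun_induction pvMergeCount a b with
  | case1 b => simp
  | case2 x xs => simp
  | case3 x xs y ys hxy ih =>
    have hx : x ∉ y :: ys := by
      intro hmem
      rcases List.mem_cons.mp hmem with h | h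
      · exact absurd h (ne_of_lt hxy)
      · exact absurd (lt_trans hxy ((List.pairwise_cons.mp hb).1 _ h)) (lt_irrefl x)
    rw [List.countP_cons, if_neg (by simpa using hx)]
    simpa using ih (List.pairwise_cons.mp ha).2 hb
  | case4 x xs y ys hxy hyx ih =>
    have hcongr : (x :: xs).countP (fun z => decide (z ∈ y :: ys))
        = (x :: xs).countP (fun z => decide (z ∈ ys)) := by
      apply List.countP_congr
      intro z hz
      have hyz : y < z := by
        rcases List.mem_cons.mp hz with h | h
        · exact h ▸ hyx
        · exact lt_of_lt_of_le hyx ((List.pairwise_cons.mp ha).1 _ h)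
      have hiff : (z ∈ y :: ys) ↔ (z ∈ ys) := by
        simp only [List.mem_cons]
        constructor
        · rintro (h | h)
          · exact absurd (h ▸ hyz) (lt_irrefl y)
          · exact h
        · exact Or.inr
      simp [hiff]
    rw [hcongr]
    exact ih ha (List.pairwise_cons.mp hb).2
  | case5 x xs y ys hxy hyx ih =>
    have hxy' : x = y := le_antisymm (not_lt.mp hyx) (not_lt.mp hxy)
    rw [List.countP_cons, if_pos (by simp [hxy'])]
    rw [ih (List.pairwise_cons.mp ha).2 hb]

-- B's merge count equals the match count of A's (unsorted, undeduplicated) lists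
theorem pvMergeCount_eq_countP (first other : List String) :
    pvMergeCount (PySem.List.sorted first (fun x => x) false)
      (PySem.List.sorted (PySem.Set.ofList other) (fun x => x) false)
    = first.countP (fun x => decide (x ∈ other)) := by
  set sf := PySem.List.sorted first (fun x => x) false with hsf
  set so := PySem.List.sorted (PySem.Set.ofList other) (fun x => x) false with hso
  have h1 : pvMergeCount sf so = sf.countP (fun x => decide (x ∈ so)) := by
    apply pvMergeCount_spec
    · simpa using PySem.List.sorted_pairwise first (fun x => x)
    · exact PySem.List.sorted_ofList_pairwise_lt other
  rw [h1]
  have h2 : sf.countP (fun x => decide (x ∈ so)) = sf.countP (fun x => decide (x ∈ other)) := by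
    apply List.countP_congr
    intro z _
    simp [hso, PySem.List.mem_sorted, PySem.Set.mem_ofList]
  rw [h2]
  exact (PySem.List.sorted_perm first (fun x => x) false).countP_eq _

-- ===== VERDICT (by name: the statement is the Claim_ definition above) =====
theorem check_value_spec : Claim_equal_check_value := by
  intro lst _ hpre
  unfold Spec_check_value check_value check_value_alt
  match lst, hpre with
  | l0 :: l1 :: rest, _ =>
    simp only [PySem.List.pyGet?_zero_cons]
    have h1 : PySem.List.pyGet? (l0 :: l1 :: rest) 1 = some l1 := by
      simp [PySem.List.pyGet?, PySem.List.pyIdx?]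
    rw [h1]
    simp only []
    set first := l0.filter (fun s => !(PySem.Str.len s == 0)) with hf
    set other := l1.filter (fun s => !(PySem.Str.len s == 0)) with ho
    rw [PySem.List.foldl_pyRange_zero_pyGetD' first ""
      (fun score x => if x ∈ other then (if score = 0 then 1 else score * 2) else score) 0]
    rw [pvMergeCount_eq_countP first other]
    have := check_value_loop other first 0
    simpa using this
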